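-- pv_equiv track=rewrite | github.com/lzf1993/PythonStudy | my/R8CheckerFollower.py | get_class_from_str
-- ===== SOURCE A (Python) =====
-- def get_class_from_str(v: str) -> str:
--     if v == "I":
--         return "int"
--     if v == "F":
--         return "float"
--     if v == "D":
--         return "double"
--     if v == "J":
--         return "long"
--     if v == "Z":
--         return "boolean"
--     if v.startswith("["):
--         return get_class_from_str(v[1:])
--     if v.startswith("L") and v.endswith(";"):
--         return v[1:-1]
--     return v
-- ===== SOURCE B (Python) =====
-- _PRIMITIVES = {"I": "int", "F": "float", "D": "double", "J": "long", "Z": "boolean"}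
--
--
-- def get_class_from_str(v: str) -> str:
--     while v.startswith("["):
--         v = v[1:]
--     prim = _PRIMITIVES.get(v)
--     if prim is not None:
--         return prim
--     if v.startswith("L") and v.endswith(";"):
--         return v[1:-1]
--     return v
-- ===== Notes on version B (the rewrite author's own statement) =====
-- stated objective: idiomatic
-- what changed: Replaced the recursive early-return chain with an iterative loop that strips all '[' array prefixes first and a dict lookup for the five primitive descriptors, keeping the L...; object-class check and fall-through.
import Mathlib
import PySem

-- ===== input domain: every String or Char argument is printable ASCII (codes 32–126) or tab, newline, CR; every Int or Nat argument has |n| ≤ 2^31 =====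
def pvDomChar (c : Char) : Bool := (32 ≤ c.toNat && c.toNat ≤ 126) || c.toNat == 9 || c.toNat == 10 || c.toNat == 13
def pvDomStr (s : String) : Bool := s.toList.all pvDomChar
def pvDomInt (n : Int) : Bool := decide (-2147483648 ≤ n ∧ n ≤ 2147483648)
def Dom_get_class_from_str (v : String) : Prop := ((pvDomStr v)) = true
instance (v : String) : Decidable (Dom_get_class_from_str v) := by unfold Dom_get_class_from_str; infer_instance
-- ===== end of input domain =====

-- B replaces A's recursive early-return chain by an iterative '['-stripping loop plus a dict lookup for
-- the five primitive descriptors (objective: idiomatic); same values on every input.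

-- ===== PORT A =====
-- A's recursion, on the character list of v; each branch in A's order.
def pvAChars (cs : List Char) : List Char :=
  if cs = "I".toList then "int".toList
  else if cs = "F".toList then "float".toList
  else if cs = "D".toList then "double".toList
  else if cs = "J".toList then "long".toList
  else if cs = "Z".toList then "boolean".toList
  else if h : PySem.Chars.startswith cs "[".toList = true then
    pvAChars cs.tail                                 -- v[1:]
  else if PySem.Chars.startswith cs "L".toList && PySem.Chars.endswith cs ";".toList then
    PySem.List.slice cs (some 1) (some (-1))         -- v[1:-1]
  else cs
termination_by cs.length
decreasing_by
  have hp := (PySem.Chars.startswith_iff cs "[".toList).mp h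
  cases cs with
  | nil => exact absurd hp (by decide)
  | cons c r => simp

def get_class_from_str (v : String) : String := String.ofList (pvAChars v.toList)

-- ===== PORT B =====
def pvPrimDict : PySem.Dict (List Char) (List Char) :=
  PySem.Dict.ofList [("I".toList, "int".toList), ("F".toList, "float".toList),
    ("D".toList, "double".toList), ("J".toList, "long".toList), ("Z".toList, "boolean".toList)]

-- B's while loop: strip all leading '[' characters.
def pvStrip : List Char → List Char
  | '[' :: rest => pvStrip rest
  | cs => cs

def pvResolve (cs : List Char) : List Char :=
  match pvPrimDict.get? cs with
  | some prim => prim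
  | none =>
    if PySem.Chars.startswith cs "L".toList && PySem.Chars.endswith cs ";".toList then
      PySem.List.slice cs (some 1) (some (-1))
    else cs

def get_class_from_str_alt (v : String) : String := String.ofList (pvResolve (pvStrip v.toList))

-- ===== PRECONDITION & SPEC =====
def Spec_get_class_from_str (v : String) (out : String) : Prop := out = get_class_from_str_alt v
instance (v : String) (out : String) : Decidable (Spec_get_class_from_str v out) := by unfold Spec_get_class_from_str; infer_instance

-- ===== CLAIM (what is proved, stated in full; the proofs are below) =====
def Claim_equal_get_class_from_str : Prop := ∀ (v : String), Dom_get_class_from_str v → Spec_get_class_from_str v (get_class_from_str v)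

-- ===== LEMMAS AND PROOFS =====

lemma pv_toList_lbr : ("[".toList : List Char) = ['['] := by decide

-- On a list not starting with '[', B's dict lookup realises A's five equality checks,
-- so the two resolvers coincide branch for branch.
lemma pv_resolve_eq (cs : List Char)
    (h : PySem.Chars.startswith cs "[".toList = false) :
    pvAChars cs = pvResolve cs := by
  rw [pvAChars, pvResolve]
  by_cases h1 : cs = "I".toList
  · subst h1; decide
  · by_cases h2 : cs = "F".toList
    · subst h2; decide
    · by_cases h3 : cs = "D".toList
      · subst h3; decide
      · by_cases h4 : cs = "J".toList
        · subst h4; decide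
        · by_cases h5 : cs = "Z".toList
          · subst h5; decide
          · have hnone : pvPrimDict.get? cs = none := by
              rw [show pvPrimDict = PySem.Dict.mk [(['I'], "int".toList), (['F'], "float".toList),
                (['D'], "double".toList), (['J'], "long".toList), (['Z'], "boolean".toList)] from by decide]
              have d1 : cs ≠ ['I'] := by intro e; exact h1 (by rw [e]; decide)
              have d2 : cs ≠ ['F'] := by intro e; exact h2 (by rw [e]; decide)
              have d3 : cs ≠ ['D'] := by intro e; exact h3 (by rw [e]; decide)
              have d4 : cs ≠ ['J'] := by intro e; exact h4 (by rw [e]; decide)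
              have d5 : cs ≠ ['Z'] := by intro e; exact h5 (by rw [e]; decide)
              simp only [PySem.Dict.get?_mk_cons, beq_iff_eq]
              rw [if_neg (fun e => d1 e.symm), if_neg (fun e => d2 e.symm),
                if_neg (fun e => d3 e.symm), if_neg (fun e => d4 e.symm),
                if_neg (fun e => d5 e.symm)]
              simp [PySem.Dict.get?]
            rw [hnone]
            simp only [if_neg h1, if_neg h2, if_neg h3, if_neg h4, if_neg h5, h,
              Bool.false_eq_true, dite_false]

lemma pv_chars_eq (cs : List Char) : pvAChars cs = pvResolve (pvStrip cs) := by
  induction cs with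
  | nil =>
    rw [show pvStrip [] = [] from rfl]
    exact pv_resolve_eq [] (by decide)
  | cons c rest ih =>
    by_cases hc : c = '['
    · subst hc
      rw [show pvStrip ('[' :: rest) = pvStrip rest from rfl, ← ih]
      rw [pvAChars]
      have hsw : PySem.Chars.startswith ('[' :: rest) "[".toList = true :=
        (PySem.Chars.startswith_iff _ _).mpr (by rw [pv_toList_lbr]; simp)
      have n1 : ¬('[' :: rest = "I".toList) := by intro e; simpa using congrArg List.head? e
      have n2 : ¬('[' :: rest = "F".toList) := by intro e; simpa using congrArg List.head? e
      have n3 : ¬('[' :: rest = "D".toList) := by intro e; simpa using congrArg List.head? e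
      have n4 : ¬('[' :: rest = "J".toList) := by intro e; simpa using congrArg List.head? e
      have n5 : ¬('[' :: rest = "Z".toList) := by intro e; simpa using congrArg List.head? e
      simp only [if_neg n1, if_neg n2, if_neg n3, if_neg n4, if_neg n5, hsw, dite_true,
        List.tail_cons]
    · have hs : pvStrip (c :: rest) = c :: rest := by
        rw [pvStrip.eq_def]
        split
        · rename_i heq; injection heq with h1 _; exact absurd h1 hc
        · rfl
      rw [hs]
      apply pv_resolve_eq
      rw [Bool.eq_false_iff]
      intro habs
      have hp := (PySem.Chars.startswith_iff _ _).mp habs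
      rw [pv_toList_lbr] at hp
      rcases List.cons_prefix_cons.mp hp with ⟨h1, -⟩
      exact hc h1.symm

-- ===== VERDICT (by name: the statement is the Claim_ definition above) =====
theorem get_class_from_str_spec : Claim_equal_get_class_from_str := by
  intro v _
  unfold Spec_get_class_from_str get_class_from_str get_class_from_str_alt
  rw [pv_chars_eq]
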